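-- pv_equiv track=rewrite | github.com/vanheeringen-lab/gimmemotifs | gimmemotifs/utils.py | join_max
-- ===== SOURCE A (Python) =====
-- def join_max(a, length, sep="", suffix=""):
--     lengths = [len(x) for x in a]
--     total = 0
--     for i, size in enumerate(lengths + [0]):
--         if total > (length - len(suffix)):
--             return sep.join(a[: i - 1]) + suffix
--         if i > 0:
--             total += 1
--         total += size
--     return sep.join(a)
-- ===== SOURCE B (Python) =====
-- def join_max(a, length, sep="", suffix=""):
--     # stage 1: prefix-cost table; cost[k] = length of the first k items joined,
--     # each separator counted as exactly 1 (as the original does)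
--     cost = [0]
--     for i, x in enumerate(a):
--         cost.append(cost[-1] + len(x) + (1 if i else 0))
--     # stage 2: binary search (bisect_right by hand) for the last prefix within budget;
--     # cost is non-decreasing, so lo ends as the number of entries <= limit
--     limit = length - len(suffix)
--     lo, hi = 0, len(cost)
--     while lo < hi:
--         mid = (lo + hi) // 2
--         if limit < cost[mid]:
--             hi = mid
--         else:
--             lo = mid + 1
--     k = lo - 1
--     if k == len(a):
--         return sep.join(a)
--     return sep.join(a[:k]) + suffix
-- ===== Notes on version B (the rewrite author's own statement) =====
-- stated objective: alternative
-- what changed: B works in two stages: it first builds the prefix-cost table (each separator counted as 1) and then finds the cutoff index by a hand-written bisect_right binary search over that non-decreasing table, slicing once at the end, instead of A's accumulate-and-early-return inside a single loop.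
import Mathlib
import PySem

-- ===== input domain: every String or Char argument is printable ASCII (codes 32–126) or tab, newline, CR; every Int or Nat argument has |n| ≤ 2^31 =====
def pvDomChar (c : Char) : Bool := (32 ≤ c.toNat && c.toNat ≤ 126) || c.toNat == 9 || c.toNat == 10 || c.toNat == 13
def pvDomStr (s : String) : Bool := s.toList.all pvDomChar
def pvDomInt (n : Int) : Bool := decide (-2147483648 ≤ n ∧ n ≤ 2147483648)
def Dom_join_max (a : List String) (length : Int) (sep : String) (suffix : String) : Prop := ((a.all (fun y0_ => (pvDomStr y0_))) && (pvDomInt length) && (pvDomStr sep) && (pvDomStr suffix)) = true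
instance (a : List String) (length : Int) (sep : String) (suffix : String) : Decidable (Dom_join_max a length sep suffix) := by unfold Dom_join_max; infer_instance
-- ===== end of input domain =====

-- B is staged: it builds the prefix-cost table and then finds the cutoff index by a
-- hand-written bisect_right binary search over that non-decreasing table, slicing once;
-- A accumulates and early-returns inside one loop. Same cost, a different decomposition.

-- ===== PORT A =====
-- A's for-loop with its early return; state = remaining enumerated (i, size) pairs and total
def joinMaxAGo (a : List String) (length : Int) (sep : String) (suffix : String) :
    List (Int × Int) → Int → String
  | [], _ => PySem.Str.join sep a
  | (i, size) :: rest, total =>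
    if length - PySem.Str.len suffix < total then
      PySem.Str.join sep (PySem.List.slice a none (some (i - 1))) ++ suffix
    else
      joinMaxAGo a length sep suffix rest ((if 0 < i then total + 1 else total) + size)

def join_max (a : List String) (length : Int) (sep : String) (suffix : String) : String :=
  let lengths := a.map PySem.Str.len
  joinMaxAGo a length sep suffix (PySem.List.enumerate (lengths ++ [0]) 0) 0

-- ===== PORT B =====
-- stage 1: cost = [0]; cost.append(cost[-1] + len(x) + (1 if i else 0)) over enumerate(a)
def joinMaxCost (a : List String) : List Int :=
  (PySem.List.enumerate a 0).foldl
    (fun cost p =>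
      cost ++ [PySem.List.pyGetD cost (-1) 0 + PySem.Str.len p.2 + (if p.1 ≠ 0 then 1 else 0)])
    [0]

-- stage 2: the while-loop 'while lo < hi: mid = (lo+hi)//2; if limit < cost[mid]: hi = mid else: lo = mid+1'
def bisectGo (cost : List Int) (limit : Int) (lo hi : Nat) : Nat :=
  if h : lo < hi then
    let mid := (lo + hi) / 2
    if limit < PySem.List.pyGetD cost (mid : Int) 0 then bisectGo cost limit lo mid
    else bisectGo cost limit (mid + 1) hi
  else lo
termination_by hi - lo
decreasing_by all_goals omega

-- k = lo - 1; full fit → plain join, else truncate + suffix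
def join_max_alt (a : List String) (length : Int) (sep : String) (suffix : String) : String :=
  let cost := joinMaxCost a
  let limit := length - PySem.Str.len suffix
  let lo := bisectGo cost limit 0 cost.length
  let k : Int := (lo : Int) - 1
  if k = (a.length : Int) then PySem.Str.join sep a
  else PySem.Str.join sep (PySem.List.slice a none (some k)) ++ suffix

-- ===== PRECONDITION & SPEC =====
def Spec_join_max (a : List String) (length : Int) (sep : String) (suffix : String) (out : String) : Prop := out = join_max_alt a length sep suffix
instance (a : List String) (length : Int) (sep : String) (suffix : String) (out : String) : Decidable (Spec_join_max a length sep suffix out) := by unfold Spec_join_max; infer_instance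

-- ===== CLAIM (what is proved, stated in full; the proofs are below) =====
def Claim_equal_join_max : Prop := ∀ (a : List String) (length : Int) (sep : String) (suffix : String), Dom_join_max a length sep suffix → Spec_join_max a length sep suffix (join_max a length sep suffix)

-- ===== LEMMAS AND PROOFS =====

-- greedy: how many further elements (each costing len+1) fit in the remaining budget
def fits1 (xs : List Int) (r : Int) : Nat :=
  match xs with
  | [] => 0
  | x :: t => if x + 1 ≤ r then 1 + fits1 t (r - x - 1) else 0

-- number of leading elements of a budgeted join that fit (first element costs len)

def fitsK (xs : List Int) (L : Int) : Nat :=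
  match xs with
  | [] => 0
  | x :: t => if x ≤ L then 1 + fits1 t (L - x) else 0

-- the tail of B's cost table: successive cost[-1] + len + 1 values

def costs1 (xs : List Int) (last : Int) : List Int :=
  match xs with
  | [] => []
  | x :: t => (last + x + 1) :: costs1 t (last + x + 1)

lemma goA (a : List String) (length : Int) (sep suffix : String) (t : List Int) (j : Nat)
    (total : Int) (ht : total ≤ length - PySem.Str.len suffix) :
    joinMaxAGo a length sep suffix (PySem.List.enumerate (t ++ [0]) ((j : Int) + 1)) total =
      if fits1 t (length - PySem.Str.len suffix - total) = t.length
      then PySem.Str.join sep a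
      else PySem.Str.join sep (a.take (j + 1 + fits1 t (length - PySem.Str.len suffix - total))) ++ suffix := by
  induction t generalizing j total with
  | nil =>
    simp only [List.nil_append, PySem.List.enumerate_cons, PySem.List.enumerate_nil]
    rw [joinMaxAGo, if_neg (by omega), joinMaxAGo]
    simp [fits1]
  | cons x t' ih =>
    simp only [List.cons_append, PySem.List.enumerate_cons]
    rw [joinMaxAGo, if_neg (by omega), if_pos (by positivity)]
    by_cases hx : x + 1 ≤ length - PySem.Str.len suffix - total
    · have := ih (j + 1) (total + 1 + x) (by omega)
      push_cast at this
      rw [this]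
      rw [fits1]
      rw [if_pos hx]
      have harg : length - PySem.Str.len suffix - total - x - 1
          = length - PySem.Str.len suffix - (total + 1 + x) := by ring
      rw [harg]
      simp only [List.length_cons]
      by_cases hfin : fits1 t' (length - PySem.Str.len suffix - (total + 1 + x)) = t'.length
      · rw [if_pos hfin, if_pos (by omega)]
      · have hneg2 : ¬(1 + fits1 t' (length - PySem.Str.len suffix - (total + 1 + x)) = t'.length + 1) := by omega
        rw [if_neg hfin, if_neg hneg2,
          show j + 1 + 1 + fits1 t' (length - PySem.Str.len suffix - (total + 1 + x))
            = j + 1 + (1 + fits1 t' (length - PySem.Str.len suffix - (total + 1 + x))) from by omega]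
    · obtain ⟨y, ys, hyy⟩ : ∃ y ys, t' ++ [(0:Int)] = y :: ys := by
        cases t' <;> exact ⟨_, _, rfl⟩
      rw [hyy, PySem.List.enumerate_cons, joinMaxAGo, if_pos (by omega)]
      rw [fits1, if_neg hx]
      rw [if_neg (by simp)]
      have : (j:Int) + 1 + 1 - 1 = ((j + 1 : Nat) : Int) := by push_cast; ring
      rw [this, PySem.List.slice_to_natCast]

lemma A_char (a : List String) (length : Int) (sep suffix : String)
    (h0 : 0 ≤ length - PySem.Str.len suffix) :
    join_max a length sep suffix =
      if fitsK (a.map PySem.Str.len) (length - PySem.Str.len suffix) = a.length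
      then PySem.Str.join sep a
      else PySem.Str.join sep (a.take (fitsK (a.map PySem.Str.len) (length - PySem.Str.len suffix))) ++ suffix := by
  cases a with
  | nil =>
    rw [join_max]
    simp only [List.map_nil, List.nil_append, PySem.List.enumerate_cons, PySem.List.enumerate_nil]
    rw [joinMaxAGo, if_neg (by omega), joinMaxAGo]
    simp [fitsK]
  | cons x t =>
    rw [join_max]
    simp only [List.map_cons, List.cons_append, PySem.List.enumerate_cons]
    rw [joinMaxAGo, if_neg (by omega), if_neg (by omega)]
    by_cases hx : PySem.Str.len x ≤ length - PySem.Str.len suffix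
    · have hg := goA (x :: t) length sep suffix (t.map PySem.Str.len) 0 (0 + PySem.Str.len x) (by omega)
      push_cast at hg
      rw [show (0:Int) + 1 = 1 from by norm_num, hg]
      rw [fitsK, if_pos hx]
      have harg : length - PySem.Str.len suffix - (0 + PySem.Str.len x)
          = length - PySem.Str.len suffix - PySem.Str.len x := by ring
      rw [harg]
      simp only [List.length_map, List.length_cons]
      by_cases hfin : fits1 (t.map PySem.Str.len) (length - PySem.Str.len suffix - PySem.Str.len x) = t.length
      · rw [if_pos (by omega), if_pos (by omega)]
      · have h1 : ¬(fits1 (t.map PySem.Str.len) (length - PySem.Str.len suffix - PySem.Str.len x) = t.length) := hfin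
        rw [if_neg (by omega), if_neg (by omega)]
    · obtain ⟨y, ys, hyy⟩ : ∃ y ys, t.map PySem.Str.len ++ [(0:Int)] = y :: ys := by
        cases t <;> exact ⟨_, _, rfl⟩
      rw [hyy, PySem.List.enumerate_cons, joinMaxAGo, if_pos (by omega)]
      rw [fitsK, if_neg hx]
      rw [if_neg (by simp)]
      rw [show (0:Int) + 1 - 1 = ((0:Nat):Int) from by norm_num, PySem.List.slice_to_natCast]

lemma A_neg (a : List String) (length : Int) (sep suffix : String)
    (h0 : length - PySem.Str.len suffix < 0) :
    join_max a length sep suffix = PySem.Str.join sep a.dropLast ++ suffix := by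
  cases a with
  | nil =>
    rw [join_max]
    simp only [List.map_nil, List.nil_append, PySem.List.enumerate_cons, PySem.List.enumerate_nil]
    rw [joinMaxAGo, if_pos (by omega)]
    rw [show (0:Int) - 1 = -1 from by norm_num, PySem.List.slice_to_neg_one]
  | cons x t =>
    rw [join_max]
    simp only [List.map_cons, List.cons_append, PySem.List.enumerate_cons]
    rw [joinMaxAGo, if_pos (by omega)]
    rw [show (0:Int) - 1 = -1 from by norm_num, PySem.List.slice_to_neg_one]

lemma costGo (l : List String) : ∀ (j : Int), 1 ≤ j → ∀ (acc : List Int) (h : acc ≠ []),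
    (PySem.List.enumerate l j).foldl
      (fun cost p =>
        cost ++ [PySem.List.pyGetD cost (-1) 0 + PySem.Str.len p.2 + (if p.1 ≠ 0 then 1 else 0)])
      acc = acc ++ costs1 (l.map PySem.Str.len) (acc.getLast h) := by
  induction l with
  | nil => intro j hj acc h; simp [costs1]
  | cons x t ih =>
    intro j hj acc h
    rw [PySem.List.enumerate_cons, List.foldl_cons]
    rw [show (PySem.List.pyGetD acc (-1) 0) = acc.getLast h from PySem.List.pyGetD_neg_one acc 0 h]
    rw [if_pos (by omega)]
    rw [ih (j+1) (by omega) _ (List.append_ne_nil_of_right_ne_nil _ (List.cons_ne_nil _ _))]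
    simp [costs1]

lemma cost_nil : joinMaxCost [] = [0] := rfl

lemma cost_cons (x : String) (t : List String) :
    joinMaxCost (x :: t) = 0 :: PySem.Str.len x :: costs1 (t.map PySem.Str.len) (PySem.Str.len x) := by
  rw [joinMaxCost, PySem.List.enumerate_cons, List.foldl_cons]
  have h0 : PySem.List.pyGetD [(0:Int)] (-1) 0 = 0 := by decide
  have h2 : [(0:Int)] ++ [PySem.List.pyGetD [(0:Int)] (-1) 0 + PySem.Str.len ((0:Int), x).2
      + (if ((0:Int), x).1 ≠ 0 then 1 else 0)] = [0, PySem.Str.len x] := by simp [h0]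
  rw [h2, costGo t (0+1) (by norm_num) _ (by simp)]
  simp

-- every entry of costs1 lies at or above its starting value
lemma costs1_ge (t : List Int) (hnn : ∀ x ∈ t, 0 ≤ x) :
    ∀ last, ∀ y ∈ costs1 t last, last ≤ y := by
  induction t with
  | nil => intro last y hy; simp [costs1] at hy
  | cons x t ih =>
    intro last y hy
    have hx : 0 ≤ x := hnn x (by simp)
    rw [costs1] at hy
    rcases List.mem_cons.1 hy with rfl | hy'
    · omega
    · have := ih (fun z hz => hnn z (by simp [hz])) (last + x + 1) y hy'
      omega

lemma costs1_pairwise (t : List Int) (hnn : ∀ x ∈ t, 0 ≤ x) :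
    ∀ last, (costs1 t last).Pairwise (· ≤ ·) := by
  induction t with
  | nil => intro last; simp [costs1]
  | cons x t ih =>
    intro last
    rw [costs1]
    refine List.Pairwise.cons ?_ (ih (fun z hz => hnn z (by simp [hz])) (last + x + 1))
    intro y hy
    exact costs1_ge t (fun z hz => hnn z (by simp [hz])) (last + x + 1) y hy

lemma map_len_nonneg (t : List String) : ∀ y ∈ t.map PySem.Str.len, 0 ≤ y := by
  intro y hy
  simp only [List.mem_map] at hy
  obtain ⟨s, _, rfl⟩ := hy
  rw [PySem.Str.len_eq]
  positivity

-- B's cost table is non-decreasing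
lemma cost_sorted (a : List String) : (joinMaxCost a).Pairwise (· ≤ ·) := by
  cases a with
  | nil => rw [cost_nil]; simp
  | cons x t =>
    rw [cost_cons]
    have hlx : 0 ≤ PySem.Str.len x := by rw [PySem.Str.len_eq]; positivity
    have hge := costs1_ge (t.map PySem.Str.len) (map_len_nonneg t) (PySem.Str.len x)
    refine List.Pairwise.cons ?_ (List.Pairwise.cons ?_ ?_)
    · intro y hy
      rcases List.mem_cons.1 hy with rfl | hy'
      · omega
      · have := hge y hy'; omega
    · intro y hy; exact hge y hy
    · exact costs1_pairwise (t.map PySem.Str.len) (map_len_nonneg t) (PySem.Str.len x)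

-- the binary search, on a segment whose fitting prefixes are downward closed,
-- returns lo + (number of fitting indices in [lo, hi))
lemma bisectGo_count (cost : List Int) (limit : Int)
    (hmono : ∀ i j : Nat, i ≤ j → j < cost.length →
      PySem.List.pyGetD cost (j:Int) 0 ≤ limit → PySem.List.pyGetD cost (i:Int) 0 ≤ limit) :
    ∀ (n lo hi : Nat), hi - lo ≤ n → hi ≤ cost.length →
      bisectGo cost limit lo hi =
        lo + (List.range' lo (hi - lo)).countP
          (fun i : Nat => decide (PySem.List.pyGetD cost (i:Int) 0 ≤ limit)) := by
  intro n
  induction n with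
  | zero =>
    intro lo hi hn _
    rw [bisectGo, dif_neg (by omega)]
    rw [show hi - lo = 0 from by omega]
    simp
  | succ n ih =>
    intro lo hi hn hhi
    by_cases hlt : lo < hi
    · rw [bisectGo, dif_pos hlt]
      simp only []
      set mid := (lo + hi) / 2 with hmid
      have hb : lo ≤ mid ∧ mid < hi := by constructor <;> omega
      by_cases hc : limit < PySem.List.pyGetD cost (mid:Int) 0
      · rw [if_pos hc, ih lo mid (by omega) (by omega)]
        have hsplit : hi - lo = (mid - lo) + (hi - mid) := by omega
        rw [hsplit, ← List.range'_append, List.countP_append]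
        simp only [one_mul]
        rw [show lo + (mid - lo) = mid from by omega]
        have hz : (List.range' mid (hi - mid)).countP
            (fun i : Nat => decide (PySem.List.pyGetD cost (i:Int) 0 ≤ limit)) = 0 := by
          rw [List.countP_eq_zero]
          intro i hi'
          rw [List.mem_range'_1] at hi'
          simp only [decide_eq_true_eq]
          intro hle
          exact absurd (hmono mid i hi'.1 (by omega) hle) (by omega)
        rw [hz]
        omega
      · rw [if_neg hc, ih (mid + 1) hi (by omega) hhi]
        have hsplit : hi - lo = (mid + 1 - lo) + (hi - (mid + 1)) := by omega
        rw [hsplit, ← List.range'_append, List.countP_append]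
        simp only [one_mul]
        rw [show lo + (mid + 1 - lo) = mid + 1 from by omega]
        have hall : (List.range' lo (mid + 1 - lo)).countP
            (fun i : Nat => decide (PySem.List.pyGetD cost (i:Int) 0 ≤ limit))
            = (List.range' lo (mid + 1 - lo)).length := by
          rw [List.countP_eq_length]
          intro i hi'
          rw [List.mem_range'_1] at hi'
          simp only [decide_eq_true_eq]
          exact hmono i mid (by omega) (by omega) (by omega)
        rw [hall, List.length_range']
        omega
    · rw [bisectGo, dif_neg hlt]
      rw [show hi - lo = 0 from by omega]
      simp

-- counting over indices equals counting over the list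
lemma countP_getD (l : List Int) (p : Int → Bool) :
    (List.range l.length).countP (fun i => p (l.getD i 0)) = l.countP p := by
  induction l with
  | nil => simp
  | cons x t ih =>
    rw [List.length_cons, List.range_succ_eq_map, List.countP_cons, List.countP_map]
    simp only [List.getD_cons_zero, List.getD_cons_succ, Function.comp_def, List.countP_cons]
    rw [ih]

lemma bisect_eq_countP (cost : List Int) (limit : Int) (hs : cost.Pairwise (· ≤ ·)) :
    bisectGo cost limit 0 cost.length = cost.countP (fun c => decide (c ≤ limit)) := by
  have hmono : ∀ i j : Nat, i ≤ j → j < cost.length →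
      PySem.List.pyGetD cost (j:Int) 0 ≤ limit → PySem.List.pyGetD cost (i:Int) 0 ≤ limit := by
    intro i j hij hj hle
    have hi : i < cost.length := by omega
    simp only [PySem.List.pyGetD_natCast] at hle ⊢
    rw [List.getD_eq_getElem _ _ hi]
    rw [List.getD_eq_getElem _ _ hj] at hle
    rcases lt_or_eq_of_le hij with h | h
    · have := (List.pairwise_iff_getElem.1 hs) i j hi hj h
      omega
    · subst h; exact hle
  rw [bisectGo_count cost limit hmono cost.length 0 cost.length (by omega) (le_refl _)]
  rw [Nat.sub_zero, ← List.range_eq_range', Nat.zero_add]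
  simp only [PySem.List.pyGetD_natCast]
  exact countP_getD cost (fun c => decide (c ≤ limit))

-- B reduced to: k = (number of prefix costs within budget) - 1
lemma B_count (a : List String) (length : Int) (sep suffix : String) :
    join_max_alt a length sep suffix =
      (let k : Int := ((joinMaxCost a).countP
          (fun c => decide (c ≤ length - PySem.Str.len suffix)) : Int) - 1
       if k = (a.length : Int) then PySem.Str.join sep a
       else PySem.Str.join sep (PySem.List.slice a none (some k)) ++ suffix) := by
  rw [join_max_alt]
  rw [bisect_eq_countP _ _ (cost_sorted a)]

lemma costs1_gt (L : Int) (t : List Int) (hnn : ∀ x ∈ t, 0 ≤ x) :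
    ∀ last, L < last → (costs1 t last).countP (fun c => decide (c ≤ L)) = 0 := by
  induction t with
  | nil => intro last h; simp [costs1]
  | cons x t ih =>
    intro last h
    have hx : 0 ≤ x := hnn x (by simp)
    rw [costs1, List.countP_cons]
    rw [ih (fun y hy => hnn y (by simp [hy])) (last + x + 1) (by omega)]
    simp [decide_eq_true_eq]
    omega

lemma costs1_count (L : Int) (t : List Int) (hnn : ∀ x ∈ t, 0 ≤ x) :
    ∀ last, (costs1 t last).countP (fun c => decide (c ≤ L)) = fits1 t (L - last) := by
  induction t with
  | nil => intro last; simp [costs1, fits1]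
  | cons x t ih =>
    intro last
    have hx : 0 ≤ x := hnn x (by simp)
    rw [costs1, List.countP_cons, fits1]
    by_cases hc : x + 1 ≤ L - last
    · rw [if_pos hc, ih (fun y hy => hnn y (by simp [hy])) (last + x + 1)]
      have : L - (last + x + 1) = L - last - x - 1 := by ring
      rw [this, if_pos (show decide (last + x + 1 ≤ L) = true from by simp only [decide_eq_true_eq]; omega)]
      omega
    · rw [if_neg hc]
      rw [costs1_gt L t (fun y hy => hnn y (by simp [hy])) (last + x + 1) (by omega),
        if_neg (show ¬ decide (last + x + 1 ≤ L) = true from by simp only [decide_eq_true_eq]; omega)]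

lemma B_char (a : List String) (length : Int) (sep suffix : String)
    (h0 : 0 ≤ length - PySem.Str.len suffix) :
    join_max_alt a length sep suffix =
      if fitsK (a.map PySem.Str.len) (length - PySem.Str.len suffix) = a.length
      then PySem.Str.join sep a
      else PySem.Str.join sep (a.take (fitsK (a.map PySem.Str.len) (length - PySem.Str.len suffix))) ++ suffix := by
  rw [B_count]
  cases a with
  | nil =>
    simp only [cost_nil]
    rw [List.countP_cons]
    simp only [List.countP_nil, List.length_nil, List.map_nil]
    rw [if_pos (show decide ((0:Int) ≤ length - PySem.Str.len suffix) = true from by simp only [decide_eq_true_eq]; omega)]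
    norm_num [fitsK]
  | cons x t =>
    simp only [cost_cons, List.map_cons]
    rw [List.countP_cons, List.countP_cons]
    rw [costs1_count (length - PySem.Str.len suffix) (t.map PySem.Str.len) (map_len_nonneg t) (PySem.Str.len x)]
    rw [if_pos (show decide ((0:Int) ≤ length - PySem.Str.len suffix) = true from by simp only [decide_eq_true_eq]; omega)]
    by_cases hx : PySem.Str.len x ≤ length - PySem.Str.len suffix
    · rw [if_pos (show decide (PySem.Str.len x ≤ length - PySem.Str.len suffix) = true from by simp only [decide_eq_true_eq]; omega)]
      rw [fitsK, if_pos hx]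
      simp only [List.length_cons]
      set m := fits1 (t.map PySem.Str.len) (length - PySem.Str.len suffix - PySem.Str.len x) with hm
      by_cases hfin : m = t.length
      · rw [if_pos (by push_cast; omega), if_pos (by omega)]
      · rw [if_neg (by push_cast; omega), if_neg (by omega)]
        rw [show (((m + 1 + 1 : Nat) : Int) - 1) = ((1 + m : Nat) : Int) from by push_cast; omega]
        rw [PySem.List.slice_to_natCast]
    · rw [if_neg (show ¬ decide (PySem.Str.len x ≤ length - PySem.Str.len suffix) = true from by simp only [decide_eq_true_eq]; omega)]
      rw [show fits1 (t.map PySem.Str.len) (length - PySem.Str.len suffix - PySem.Str.len x) = 0 from by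
        cases t with
        | nil => rfl
        | cons y ys =>
          simp only [List.map_cons, fits1]
          rw [if_neg]
          have := map_len_nonneg (y :: ys) (PySem.Str.len y) (by simp)
          omega]
      rw [fitsK, if_neg hx]
      simp only [List.length_cons]
      rw [if_neg (by push_cast; omega), if_neg (by omega)]
      norm_num
      rw [show ((0:Int)) = (((0:Nat)):Int) from rfl, PySem.List.slice_to_natCast]
      norm_num

lemma B_neg (a : List String) (length : Int) (sep suffix : String)
    (h0 : length - PySem.Str.len suffix < 0) :
    join_max_alt a length sep suffix = PySem.Str.join sep a.dropLast ++ suffix := by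
  rw [B_count]
  cases a with
  | nil =>
    simp only [cost_nil]
    rw [List.countP_cons]
    simp only [List.countP_nil, List.length_nil]
    rw [if_neg (show ¬ decide ((0:Int) ≤ length - PySem.Str.len suffix) = true from by simp only [decide_eq_true_eq]; omega)]
    rw [if_neg (by norm_num)]
    rw [show ((((0 + 0 : Nat)):Int) - 1) = (-1 : Int) from by norm_num,
      PySem.List.slice_to_neg_one]
  | cons x t =>
    simp only [cost_cons]
    rw [List.countP_cons, List.countP_cons]
    have hlx : 0 ≤ PySem.Str.len x := by rw [PySem.Str.len_eq]; positivity
    rw [costs1_gt (length - PySem.Str.len suffix) (t.map PySem.Str.len) (map_len_nonneg t) (PySem.Str.len x) (by omega)]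
    rw [if_neg (show ¬ decide ((0:Int) ≤ length - PySem.Str.len suffix) = true from by simp only [decide_eq_true_eq]; omega)]
    rw [if_neg (show ¬ decide (PySem.Str.len x ≤ length - PySem.Str.len suffix) = true from by simp only [decide_eq_true_eq]; omega)]
    simp only [List.length_cons]
    rw [if_neg (by push_cast; omega)]
    rw [show ((((0 + 0 + 0 : Nat)):Int) - 1) = (-1 : Int) from by norm_num,
      PySem.List.slice_to_neg_one]

-- ===== VERDICT (by name: the statement is the Claim_ definition above) =====
theorem join_max_spec : Claim_equal_join_max := by
  intro a length sep suffix _hDom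
  unfold Spec_join_max
  by_cases hL : 0 ≤ length - PySem.Str.len suffix
  · rw [A_char a length sep suffix hL, B_char a length sep suffix hL]
  · rw [A_neg a length sep suffix (by omega), B_neg a length sep suffix (by omega)]
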